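/-
  THE EXPECTED TOKENS MEAN WHAT THEY SHOULD: every token of `Layout.tokens` delimits, in the text, a well-formed piece of JSON of its type.

  `Spans text t`: either `t` is a STRING token and `text[t.start - 1]` is a quote, `text[t.start, t.end)` a string body (RFC 8259 §7),
  `text[t.end]` the closing quote; or `text[t.start, t.end)` is the rendering of a well-formed layout (an object for an OBJECT token,
  an array for an ARRAY token, a number / true / false / null for a PRIMITIVE token).
  `Layout.tokens_spans`: for a well-formed layout `l` standing at offset `pos` of `text`, every token of `l.tokens pos idx parent` spans.
  (A check of the offset arithmetic of Json/Jsmn/Expected.lean against the text itself; the theorems of Correct*.lean do not depend on it.)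
  `Value.shape`: the (type, size, parent) of the tokens, defined on the VALUE (no whitespace, no offsets); `Layout.tokens_shape`: the
  expected tokens of any layout of the value have that shape.
-/
import Json.Jsmn.ExpectedFacts

namespace Json
open Jsmn

/-- jsmn's token type for a layout. -/
def Layout.jsmnType : Layout → Nat
  | .array _ _ => JSMN_ARRAY
  | .object _ _ => JSMN_OBJECT
  | .string _ => JSMN_STRING
  | _ => JSMN_PRIMITIVE

/-- The token `t` delimits a well-formed piece of `text` of its type. -/
def Spans (text : List UInt8) (t : Token) : Prop :=
  (∃ (b : List UInt8) (s : Nat) (rest : List UInt8), IsStringBody b ∧ t.type = JSMN_STRING ∧ t.start = ((s + 1 : Nat) : Int) ∧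
      t.«end» = ((s + 1 + b.length : Nat) : Int) ∧ text.drop s = 0x22 :: b ++ 0x22 :: rest) ∨
  (∃ (sub : Layout) (s : Nat) (rest : List UInt8), sub.WellFormed ∧ sub.jsmnType ≠ JSMN_STRING ∧ t.type = sub.jsmnType ∧ t.start = (s : Int) ∧
      t.«end» = ((s + sub.text.length : Nat) : Int) ∧ text.drop s = sub.text ++ rest)

mutual
theorem Layout.tokens_spans : (l : Layout) → l.WellFormed → ∀ (pos idx : Nat) (par : Int) (text rest : List UInt8),
    text.drop pos = l.text ++ rest → ∀ t ∈ l.tokens pos idx par, Spans text t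
  | .null, wf => fun pos idx par text rest hd t ht => by
    simp only [Layout.tokens, List.mem_singleton] at ht; subst ht
    exact Or.inr ⟨.null, pos, rest, wf, by decide, rfl, rfl, rfl, hd⟩
  | .true, wf => fun pos idx par text rest hd t ht => by
    simp only [Layout.tokens, List.mem_singleton] at ht; subst ht
    exact Or.inr ⟨.true, pos, rest, wf, by decide, rfl, rfl, rfl, hd⟩
  | .false, wf => fun pos idx par text rest hd t ht => by
    simp only [Layout.tokens, List.mem_singleton] at ht; subst ht
    exact Or.inr ⟨.false, pos, rest, wf, by decide, rfl, rfl, rfl, hd⟩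
  | .number n, wf => fun pos idx par text rest hd t ht => by
    simp only [Layout.tokens, List.mem_singleton] at ht; subst ht
    exact Or.inr ⟨.number n, pos, rest, wf, by simp [Layout.jsmnType, JSMN_PRIMITIVE, JSMN_STRING], rfl, rfl, rfl, hd⟩
  | .string b, wf => fun pos idx par text rest hd t ht => by
    simp only [Layout.tokens, List.mem_singleton] at ht; subst ht
    exact Or.inl ⟨b, pos, rest, wf, rfl, rfl, rfl, by simpa [Layout.text] using hd⟩
  | .array ws items, wf => fun pos idx par text rest hd t ht => by
    simp only [Layout.tokens, List.mem_cons] at ht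
    rcases ht with rfl | ht
    · exact Or.inr ⟨.array ws items, pos, rest, wf, by simp [Layout.jsmnType, JSMN_ARRAY, JSMN_STRING], rfl, rfl, by simp [Layout.text]; omega, hd⟩
    · have hd0 : text.drop pos = 0x5b :: (ws ++ (items.text ++ 0x5d :: rest)) := by simpa [Layout.text] using hd
      exact Items.tokens_spans items wf.2 (pos + 1 + ws.length) (idx + 1) idx text _ (drop_advance (drop_succ hd0)) t ht
  | .object ws members, wf => fun pos idx par text rest hd t ht => by
    simp only [Layout.tokens, List.mem_cons] at ht
    rcases ht with rfl | ht
    · exact Or.inr ⟨.object ws members, pos, rest, wf, by simp [Layout.jsmnType, JSMN_OBJECT, JSMN_STRING], rfl, rfl, by simp [Layout.text]; omega, hd⟩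
    · have hd0 : text.drop pos = 0x7b :: (ws ++ (members.text ++ 0x7d :: rest)) := by simpa [Layout.text] using hd
      exact Members.tokens_spans members wf.2 (pos + 1 + ws.length) (idx + 1) idx text _ (drop_advance (drop_succ hd0)) t ht
theorem Items.tokens_spans : (is : Items) → is.WellFormed → ∀ (pos idx : Nat) (par : Int) (text rest : List UInt8),
    text.drop pos = is.text ++ rest → ∀ t ∈ is.tokens pos idx par, Spans text t
  | .nil, _ => fun _ _ _ _ _ _ t ht => by simp [Items.tokens] at ht
  | .cons pre item post tail, wf => fun pos idx par text rest hd t ht => by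
    have IH := Items.tokens_spans tail wf.2.2.2
    have hd0 : text.drop pos = pre ++ (item.text ++ (post ++ (tail.tail ++ rest))) := by simpa [Items.text] using hd
    simp only [Items.tokens, List.mem_append] at ht
    rcases ht with ht | ht
    · exact Layout.tokens_spans item wf.2.1 (pos + pre.length) idx par text _ (drop_advance hd0) t ht
    · cases tail with
      | nil => simp [Items.tokens] at ht
      | cons pre2 item2 post2 tail2 =>
        have hd3 := drop_advance (drop_advance (drop_advance hd0))
        have hd3' : text.drop (pos + pre.length + item.text.length + post.length) =
            0x2c :: ((Items.cons pre2 item2 post2 tail2).text ++ rest) := by simpa [Items.tail, Items.text] using hd3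
        exact IH _ _ par text rest (drop_succ hd3') t ht
theorem Members.tokens_spans : (ms : Members) → ms.WellFormed → ∀ (pos idx : Nat) (par : Int) (text rest : List UInt8),
    text.drop pos = ms.text ++ rest → ∀ t ∈ ms.tokens pos idx par, Spans text t
  | .nil, _ => fun _ _ _ _ _ _ t ht => by simp [Members.tokens] at ht
  | .cons pre key mid pre' val post tail, wf => fun pos idx par text rest hd t ht => by
    have IH := Members.tokens_spans tail wf.2.2.2.2.2.2
    have hd0 : text.drop pos = pre ++ (0x22 :: (key ++ 0x22 :: (mid ++ 0x3a :: (pre' ++ (val.text ++ (post ++ (tail.tail ++ rest))))))) := by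
      simpa [Members.text] using hd
    have hd1 := drop_advance hd0
    have hd2 := drop_advance (drop_succ (drop_advance (drop_succ hd1)))
    have hd5 := drop_advance (drop_succ hd2)
    simp only [Members.tokens, List.mem_cons, List.mem_append] at ht
    rcases ht with (rfl | ht) | ht
    · exact Or.inl ⟨key, pos + pre.length, _, wf.2.1, rfl, rfl, rfl, by simpa using hd1⟩
    · exact Layout.tokens_spans val wf.2.2.2.2.1 _ (idx + 1) idx text _ hd5 t ht
    · cases tail with
      | nil => simp [Members.tokens] at ht
      | cons pre2 key2 mid2 pre2' val2 post2 tail2 =>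
        have hd7 := drop_advance (drop_advance hd5)
        have hd7' : text.drop (pos + pre.length + 1 + key.length + 1 + mid.length + 1 + pre'.length + val.text.length + post.length) =
            0x2c :: ((Members.cons pre2 key2 mid2 pre2' val2 post2 tail2).text ++ rest) := by simpa [Members.tail, Members.text] using hd7
        exact IH _ _ par text rest (drop_succ hd7') t ht
end

/-! ### Types, sizes and parents depend on the value alone -/

mutual
/-- **The (type, size, parent) of the tokens of a value**, in pre-order, first token index `idx`, enclosing token `parent`:
what jsmn should report about the value whatever the whitespace. -/
def Value.shape : Value → (idx : Nat) → (parent : Int) → List (Nat × Int × Int)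
  | .array items, idx, parent => (JSMN_ARRAY, (items.length : Int), parent) :: shapeList items (idx + 1) idx
  | .object members, idx, parent => (JSMN_OBJECT, (members.length : Int), parent) :: shapeMembers members (idx + 1) idx
  | .string _, _, parent => [(JSMN_STRING, 0, parent)]
  | _, _, parent => [(JSMN_PRIMITIVE, 0, parent)]
/-- `shape` of the items of an array. -/
def shapeList : List Value → (idx : Nat) → (parent : Int) → List (Nat × Int × Int)
  | [], _, _ => []
  | v :: vs, idx, parent => v.shape idx parent ++ shapeList vs (idx + v.count) parent
/-- `shape` of the members of an object: the key (a STRING of size 1), then the value under it. -/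
def shapeMembers : List (List UInt8 × Value) → (idx : Nat) → (parent : Int) → List (Nat × Int × Int)
  | [], _, _ => []
  | (_, v) :: ms, idx, parent => (JSMN_STRING, 1, parent) :: v.shape (idx + 1) idx ++ shapeMembers ms (idx + 1 + v.count) parent
end

/-- The (type, size, parent) of a token. -/
def _root_.Jsmn.Token.shape (t : Token) : Nat × Int × Int := (t.type, t.size, t.parent)

theorem Items.length_values : (is : Items) → is.values.length = is.length
  | .nil => rfl
  | .cons _ _ _ rest => by simp [Items.values, Items.length, Items.length_values rest]; omega
theorem Members.length_values : (ms : Members) → ms.values.length = ms.length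
  | .nil => rfl
  | .cons _ _ _ _ _ _ rest => by simp [Members.values, Members.length, Members.length_values rest]; omega

mutual
theorem Layout.tokens_shape : (l : Layout) → ∀ (pos idx : Nat) (par : Int), (l.tokens pos idx par).map Token.shape = l.value.shape idx par
  | .null, _, _, _ | .true, _, _, _ | .false, _, _, _ | .number _, _, _, _ | .string _, _, _, _ => rfl
  | .array _ items, pos, idx, par => by
    simp [Layout.tokens, Layout.value, Value.shape, Token.shape, Items.tokens_shape items, Items.length_values]
  | .object _ members, pos, idx, par => by
    simp [Layout.tokens, Layout.value, Value.shape, Token.shape, Members.tokens_shape members, Members.length_values]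
theorem Items.tokens_shape : (is : Items) → ∀ (pos idx : Nat) (par : Int), (is.tokens pos idx par).map Token.shape = shapeList is.values idx par
  | .nil, _, _, _ => rfl
  | .cons _ item _ rest, pos, idx, par => by
    simp [Items.tokens, Items.values, shapeList, Layout.tokens_shape item, Items.tokens_shape rest, Layout.count_value]
theorem Members.tokens_shape : (ms : Members) → ∀ (pos idx : Nat) (par : Int),
    (ms.tokens pos idx par).map Token.shape = shapeMembers ms.values idx par
  | .nil, _, _, _ => rfl
  | .cons _ _ _ _ val _ rest, pos, idx, par => by
    simp [Members.tokens, Members.values, shapeMembers, Token.shape, Layout.tokens_shape val, Members.tokens_shape rest, Layout.count_value]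
end

end Json
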